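-- pv_equiv track=rewrite | github.com/staggeredsix/nemostation | vendors/daystrom_memory_lattice_alpha1/daystrom_dml/utils.py | _split_paragraph
-- ===== SOURCE A (Python) =====
-- from typing import Iterable, List, Sequence
--
-- def estimate_tokens(text: str) -> int:
--     """Rough token estimation using a GPT-2 style heuristic."""
--
--     if not text:
--         return 0
--     # Empirical: 1 token ~ 4 characters for english-like text.
--     return max(1, int(len(text) / 4))
--
-- def _split_paragraph(paragraph: str, max_tokens: int) -> List[str]:
--     """Split a paragraph into smaller segments if it exceeds ``max_tokens``."""
--
--     tokens = estimate_tokens(paragraph)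
--     if tokens <= max_tokens:
--         return [paragraph]
--     words = paragraph.split()
--     if not words:
--         return [paragraph]
--     segments: List[str] = []
--     current: List[str] = []
--     current_tokens = 0
--     for word in words:
--         word_tokens = estimate_tokens(word + " ")
--         if current and current_tokens + word_tokens > max_tokens:
--             segments.append(" ".join(current))
--             current = []
--             current_tokens = 0
--         current.append(word)
--         current_tokens += word_tokens
--     if current:
--         segments.append(" ".join(current))
--     return segments
-- ===== SOURCE B (Python) =====
-- from typing import List
--
--
-- def _split_paragraph(paragraph: str, max_tokens: int) -> List[str]:
--     """Split a paragraph into token-bounded word segments (prefix sums + binary search)."""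
--
--     # same whole-paragraph estimate guard as the original
--     if (0 if not paragraph else max(1, int(len(paragraph) / 4))) <= max_tokens:
--         return [paragraph]
--     words = paragraph.split()
--     if not words:
--         return [paragraph]
--     # prefix[i] = estimated tokens of the first i words (each counted with a trailing space)
--     prefix = [0]
--     total = 0
--     for w in words:
--         total += max(1, (len(w) + 1) // 4)
--         prefix.append(total)
--     n = len(words)
--     segments = []
--     s = 0
--     while s < n:
--         target = prefix[s] + max_tokens
--         # rightmost index with prefix value <= target (hand-rolled bisect_right)
--         lo, hi = 0, n + 1
--         while lo < hi:
--             mid = (lo + hi) // 2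
--             if prefix[mid] <= target:
--                 lo = mid + 1
--             else:
--                 hi = mid
--         e = max(lo - 1, s + 1)  # always emit at least one word
--         segments.append(" ".join(words[s:e]))
--         s = e
--     return segments
-- ===== Notes on version B (the rewrite author's own statement) =====
-- stated objective: alternative
-- what changed: Replaces the word-by-word accumulator loop by a prefix-sum array over per-word token weights plus a hand-rolled binary search that finds each segment's end index directly.
import Mathlib
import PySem

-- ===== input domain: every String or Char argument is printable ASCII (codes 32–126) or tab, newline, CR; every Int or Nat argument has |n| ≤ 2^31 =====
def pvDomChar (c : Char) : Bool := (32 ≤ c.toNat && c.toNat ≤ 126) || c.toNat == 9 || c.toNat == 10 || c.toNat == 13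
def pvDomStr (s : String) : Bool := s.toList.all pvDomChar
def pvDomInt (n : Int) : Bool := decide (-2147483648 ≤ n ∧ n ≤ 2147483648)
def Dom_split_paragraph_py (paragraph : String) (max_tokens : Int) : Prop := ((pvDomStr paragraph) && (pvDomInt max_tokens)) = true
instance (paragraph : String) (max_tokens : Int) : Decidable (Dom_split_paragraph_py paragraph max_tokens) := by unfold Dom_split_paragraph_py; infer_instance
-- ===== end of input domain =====

-- B replaces A's word-by-word accumulator loop by prefix sums of the per-word token
-- weights plus a hand-rolled binary search for each segment's end (objective: alternative).

-- ===== PORT A =====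
-- estimate_tokens on the character list; int(len(text)/4) is floor division here since the
-- length is nonnegative (exact for any realistic length).
def pvEstTokens (cs : List Char) : Int :=
  if cs.length = 0 then 0 else max 1 (PySem.Int.floordiv (cs.length : Int) 4)

-- step of A's for-loop: state = (segments, current, current_tokens)
def pvStepA (max_tokens : Int) (acc : List String × List String × Int) (w : String) :
    List String × List String × Int :=
  let wt := pvEstTokens (w.toList ++ [' '])   -- estimate_tokens(word + " ")
  let segments := acc.1
  let current := acc.2.1
  let current_tokens := acc.2.2
  if current ≠ [] ∧ current_tokens + wt > max_tokens then
    (segments ++ [PySem.Str.join " " current], [w], wt)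
  else
    (segments, current ++ [w], current_tokens + wt)

def split_paragraph_py (paragraph : String) (max_tokens : Int) : List String :=
  let tokens := pvEstTokens paragraph.toList
  if tokens ≤ max_tokens then [paragraph]
  else
    let words := PySem.Str.split₀ paragraph
    if words = [] then [paragraph]
    else
      let st := words.foldl (pvStepA max_tokens) ([], [], 0)
      if st.2.1 ≠ [] then st.1 ++ [PySem.Str.join " " st.2.1] else st.1

-- ===== PORT B =====
-- hand-rolled bisect_right of Source B: shrink [lo, hi) to the insertion point.
-- prefix[mid] is always in range here, so pyGetD's default is never consulted.
def pvBsr (pre : List Int) (target : Int) (lo hi : Int) : Int :=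
  if _h : lo < hi then
    let mid := PySem.Int.floordiv (lo + hi) 2
    if PySem.List.pyGetD pre mid 0 ≤ target then pvBsr pre target (mid + 1) hi
    else pvBsr pre target lo mid
  else lo
termination_by (hi - lo).toNat
decreasing_by
  · have h2 := PySem.Int.le_floordiv_iff_mul_le (a := lo + hi) (b := 2) (q := lo) (by omega)
    omega
  · have h2 := PySem.Int.floordiv_lt_iff_lt_mul (a := lo + hi) (b := 2) (q := hi) (by omega)
    omega

-- Source B's while-loop over segment start s (each iteration appends one segment).
def pvSegLoop (words : List String) (pre : List Int) (max_tokens n s : Int) : List String :=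
  if _h : s < n then
    let target := PySem.List.pyGetD pre s 0 + max_tokens
    let lo := pvBsr pre target 0 (n + 1)
    let e := max (lo - 1) (s + 1)
    PySem.Str.join " " (PySem.List.slice words (some s) (some e)) :: pvSegLoop words pre max_tokens n e
  else []
termination_by (n - s).toNat
decreasing_by
  have : s + 1 ≤ max (pvBsr pre (PySem.List.pyGetD pre s 0 + max_tokens) 0 (n + 1) - 1) (s + 1) :=
    le_max_right _ _
  omega

def split_paragraph_py_alt (paragraph : String) (max_tokens : Int) : List String :=
  if pvEstTokens paragraph.toList ≤ max_tokens then [paragraph]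
  else
    let words := PySem.Str.split₀ paragraph
    if words = [] then [paragraph]
    else
      let pt := words.foldl
        (fun (acc : List Int × Int) w =>
          let t := acc.2 + max 1 (PySem.Int.floordiv ((w.toList.length : Int) + 1) 4)
          (acc.1 ++ [t], t)) ([0], 0)
      pvSegLoop words pt.1 max_tokens (words.length : Int) 0

-- ===== PRECONDITION & SPEC =====
def Spec_split_paragraph_py (paragraph : String) (max_tokens : Int) (out : List String) : Prop := out = split_paragraph_py_alt paragraph max_tokens
instance (paragraph : String) (max_tokens : Int) (out : List String) : Decidable (Spec_split_paragraph_py paragraph max_tokens out) := by unfold Spec_split_paragraph_py; infer_instance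

-- ===== CLAIM (what is proved, stated in full; the proofs are below) =====
def Claim_equal_split_paragraph_py : Prop := ∀ (paragraph : String) (max_tokens : Int), Dom_split_paragraph_py paragraph max_tokens → Spec_split_paragraph_py paragraph max_tokens (split_paragraph_py paragraph max_tokens)

-- ===== LEMMAS AND PROOFS =====

-- per-word token weight estimate_tokens(w + " ")
def pvWt (w : String) : Int := max 1 (PySem.Int.floordiv ((w.toList.length : Int) + 1) 4)

-- prefix token sum of the first i words
def pvS (ws : List String) (i : Nat) : Int := ((ws.take i).map pvWt).sum

-- A's loop restructured as a recursion over the remaining words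
def pvChunks (M : Int) (cur : List String) (t : Int) : List String → List String
  | [] => if cur = [] then [] else [PySem.Str.join " " cur]
  | w :: ws =>
      if cur ≠ [] ∧ t + pvWt w > M then
        PySem.Str.join " " cur :: pvChunks M [w] (pvWt w) ws
      else pvChunks M (cur ++ [w]) (t + pvWt w) ws

-- the end index B computes for a segment starting at s
def pvE (pre : List Int) (M n s : Int) : Int :=
  max (pvBsr pre (PySem.List.pyGetD pre s 0 + M) 0 (n + 1) - 1) (s + 1)

lemma pvWt_pos (w : String) : 1 ≤ pvWt w := le_max_left _ _

lemma pvEst_append_space (w : String) : pvEstTokens (w.toList ++ [' ']) = pvWt w := by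
  simp [pvEstTokens, pvWt]

lemma pvS_succ (ws : List String) (i : Nat) (h : i < ws.length) :
    pvS ws (i + 1) = pvS ws i + pvWt ws[i] := by
  unfold pvS
  simp only [List.map_take]
  rw [List.take_add_one, List.getElem?_map, List.getElem?_eq_getElem h]
  simp

lemma pvS_add_le (ws : List String) (i j : Nat) (hij : i ≤ j) (hj : j ≤ ws.length) :
    pvS ws i + ((j : Int) - (i : Int)) ≤ pvS ws j := by
  induction j with
  | zero =>
      have : i = 0 := by omega
      subst this; simp
  | succ j ih =>
      rcases Nat.lt_or_ge i (j+1) with hlt | hge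
      · have h1 := ih (by omega) (by omega)
        have h2 := pvS_succ ws j (by omega)
        have h3 := pvWt_pos (ws[j]'(by omega))
        push_cast
        omega
      · have : i = j + 1 := by omega
        subst this; simp

lemma pvFoldPre (ws : List String) (p0 : List Int) (t0 : Int) :
    ws.foldl (fun (acc : List Int × Int) w =>
        let t := acc.2 + max 1 (PySem.Int.floordiv ((w.toList.length : Int) + 1) 4)
        (acc.1 ++ [t], t)) (p0, t0)
      = (p0 ++ (List.range ws.length).map (fun i => t0 + pvS ws (i+1)), t0 + pvS ws ws.length) := by
  induction ws generalizing p0 t0 with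
  | nil => simp [pvS]
  | cons w ws ih =>
      rw [List.foldl_cons, ih]
      have hs : ∀ i : Nat, pvS (w :: ws) (i+1) = pvWt w + pvS ws i := by
        intro i; simp [pvS, List.take_succ_cons]
      simp only [Prod.mk.injEq]
      constructor
      · simp only [List.length_cons]
        rw [List.range_succ_eq_map]
        simp only [List.map_cons, List.map_map]
        rw [List.append_assoc]
        simp [Function.comp, pvS, pvWt]
        intro a _
        ring
      · simp [hs, pvWt]; ring

lemma pvPre_getD (ws : List String) (i : Nat) (h : i ≤ ws.length) :
    PySem.List.pyGetD ((List.range (ws.length+1)).map (pvS ws)) (i : Int) 0 = pvS ws i := by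
  rw [PySem.List.pyGetD_natCast]
  rw [List.getD_eq_getElem?_getD]
  simp [Nat.lt_succ_of_le h]

-- invariant of the hand-rolled bisect_right
lemma pvBsr_inv (pre : List Int) (target : Int) (lo hi : Int)
    (h0 : 0 ≤ lo) (hlh : lo ≤ hi) (hh : hi ≤ (pre.length : Int))
    (hL : lo = 0 ∨ PySem.List.pyGetD pre (lo - 1) 0 ≤ target)
    (hR : hi = (pre.length : Int) ∨ target < PySem.List.pyGetD pre hi 0) :
    lo ≤ pvBsr pre target lo hi ∧ pvBsr pre target lo hi ≤ hi ∧
      (pvBsr pre target lo hi = 0 ∨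
        PySem.List.pyGetD pre (pvBsr pre target lo hi - 1) 0 ≤ target) ∧
      (pvBsr pre target lo hi = (pre.length : Int) ∨
        target < PySem.List.pyGetD pre (pvBsr pre target lo hi) 0) := by
  fun_induction pvBsr pre target lo hi with
  | case1 lo hi h mid hle ih =>
      have hb1 := PySem.Int.le_floordiv_iff_mul_le (a := lo + hi) (b := 2) (q := lo) (by omega)
      have hb2 := PySem.Int.floordiv_lt_iff_lt_mul (a := lo + hi) (b := 2) (q := hi) (by omega)
      have := ih (by omega) (by omega) (by omega) (by right; simpa using hle) hR
      omega
  | case2 lo hi h mid hgt ih =>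
      have hb1 := PySem.Int.le_floordiv_iff_mul_le (a := lo + hi) (b := 2) (q := lo) (by omega)
      have hb2 := PySem.Int.floordiv_lt_iff_lt_mul (a := lo + hi) (b := 2) (q := hi) (by omega)
      have := ih h0 (by omega) (by omega) hL (by right; omega)
      omega
  | case3 lo hi h =>
      have heq : lo = hi := by omega
      subst heq
      exact ⟨le_refl _, le_refl _, hL, hR⟩

-- characterisation of the end index pvE computed from the prefix table of ws
lemma pvE_char (ws : List String) (M : Int) (s : Nat) (hs : s < ws.length) :
    ∃ e : Nat, pvE ((List.range (ws.length+1)).map (pvS ws)) M (ws.length : Int) (s : Int) = (e : Int) ∧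
      s + 1 ≤ e ∧ e ≤ ws.length ∧
      (pvS ws e - pvS ws s ≤ M ∨ e = s + 1) ∧
      (e = ws.length ∨ M < pvS ws (e+1) - pvS ws s) ∧
      (∀ j : Nat, s < j → j ≤ ws.length → pvS ws j - pvS ws s ≤ M → j ≤ e) := by
  set n := ws.length with hn
  set pre := (List.range (n+1)).map (pvS ws) with hpre
  have hlen : (pre.length : Int) = (n : Int) + 1 := by simp [hpre]
  have hconv : ∀ i : Int, 0 ≤ i → i ≤ (n : Int) → PySem.List.pyGetD pre i 0 = pvS ws i.toNat := by
    intro i h0 hin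
    have h1 : i = ((i.toNat : Nat) : Int) := by omega
    rw [h1, hpre, pvPre_getD ws i.toNat (by omega)]
    norm_cast
  have hmono : ∀ i j : Nat, i ≤ j → j ≤ n → pvS ws i ≤ pvS ws j := by
    intro i j hij hj
    have := pvS_add_le ws i j hij hj
    omega
  have htarget : PySem.List.pyGetD pre (s : Int) 0 + M = pvS ws s + M := by
    rw [hconv (s : Int) (by omega) (by omega)]
    simp
  set target := PySem.List.pyGetD pre (s : Int) 0 + M with ht
  set r := pvBsr pre target 0 ((n : Int) + 1) with hr
  have hinv := pvBsr_inv pre target 0 ((n : Int) + 1) (le_refl 0) (by omega) (by omega)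
      (Or.inl rfl) (Or.inl hlen.symm)
  rw [← hr] at hinv
  obtain ⟨hr0, hrn, hrL, hrR⟩ := hinv
  rw [hlen] at hrR
  have hE : pvE pre M (n : Int) (s : Int) = max (r - 1) ((s : Int) + 1) := rfl
  refine ⟨(max (r - 1) ((s : Int) + 1)).toNat, ?_, ?_, ?_, ?_, ?_, ?_⟩
  · rw [hE]; omega
  · omega
  · -- e ≤ n
    omega
  · -- pvS e - pvS s ≤ M ∨ e = s + 1
    rcases Int.lt_or_le ((s : Int) + 1) (r - 1) with hc | hc
    · left
      have he : ((max (r - 1) ((s : Int) + 1)).toNat : Int) = r - 1 := by omega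
      have hLv : PySem.List.pyGetD pre (r - 1) 0 ≤ target := by
        rcases hrL with h | h
        · omega
        · exact h
      rw [hconv (r - 1) (by omega) (by omega)] at hLv
      rw [htarget] at hLv
      have : (max (r - 1) ((s : Int) + 1)).toNat = (r - 1).toNat := by omega
      rw [this]
      omega
    · right; omega
  · -- e = n ∨ M < pvS (e+1) - pvS s
    set e := (max (r - 1) ((s : Int) + 1)).toNat with he
    rcases Nat.eq_or_lt_of_le (show e ≤ n by omega) with heq | hlt
    · left; exact heq
    · right
      have hrne : r ≠ (n : Int) + 1 := by omega
      have hRv : target < PySem.List.pyGetD pre r 0 := by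
        rcases hrR with h | h
        · omega
        · exact h
      rw [hconv r (by omega) (by omega)] at hRv
      rw [htarget] at hRv
      have hle : r.toNat ≤ e + 1 := by omega
      have := hmono r.toNat (e+1) hle (by omega)
      omega
  · -- maximality
    intro j hsj hjn hjM
    set e := (max (r - 1) ((s : Int) + 1)).toNat with he
    by_cases hcase : r = (n : Int) + 1
    · omega
    · have hRv : target < PySem.List.pyGetD pre r 0 := by
        rcases hrR with h | h
        · omega
        · exact h
      rw [hconv r (by omega) (by omega)] at hRv
      rw [htarget] at hRv
      by_contra hcon
      have hrj : r.toNat ≤ j := by omega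
      have := hmono r.toNat j hrj hjn
      omega

-- the finishing step after A's fold
def pvFin (st : List String × List String × Int) : List String :=
  if st.2.1 ≠ [] then st.1 ++ [PySem.Str.join " " st.2.1] else st.1

lemma pvStepA_eq (M : Int) (segs cur : List String) (t : Int) (w : String) :
    pvStepA M (segs, cur, t) w =
      if cur ≠ [] ∧ t + pvWt w > M then (segs ++ [PySem.Str.join " " cur], [w], pvWt w)
      else (segs, cur ++ [w], t + pvWt w) := by
  simp [pvStepA, pvEst_append_space]

-- A's finished fold equals pvChunks
lemma pvFoldA (M : Int) (ws : List String) (segs cur : List String) (t : Int) :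
    pvFin (ws.foldl (pvStepA M) (segs, cur, t)) = segs ++ pvChunks M cur t ws := by
  induction ws generalizing segs cur t with
  | nil =>
      by_cases h : cur = [] <;> simp [pvChunks, pvFin, h]
  | cons w ws ih =>
      rw [List.foldl_cons, pvStepA_eq]
      by_cases h : cur ≠ [] ∧ t + pvWt w > M
      · rw [if_pos h, ih]
        simp [pvChunks, h]
      · rw [if_neg h, ih]
        simp [pvChunks, h]



lemma pvSegLoop_stop (ws : List String) (pre : List Int) (M n s : Int) (h : ¬ s < n) :
    pvSegLoop ws pre M n s = [] := by
  unfold pvSegLoop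
  rw [dif_neg h]

lemma pvSegLoop_step (ws : List String) (pre : List Int) (M n s : Int) (h : s < n) :
    pvSegLoop ws pre M n s =
      PySem.Str.join " " (PySem.List.slice ws (some s) (some (pvE pre M n s)))
        :: pvSegLoop ws pre M n (pvE pre M n s) := by
  conv_lhs => unfold pvSegLoop
  rw [dif_pos h]
  rfl

lemma pvSliceNe (ws : List String) (s j : Nat) (hsj : s < j) (hj : j ≤ ws.length) :
    PySem.List.slice ws (some (s:Int)) (some (j:Int)) ≠ [] := by
  rw [PySem.List.slice_natCast]
  have : ((ws.drop s).take (j - s)).length = min (j - s) (ws.length - s) := by simp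
  intro hnil
  rw [hnil] at this
  simp at this
  omega

lemma pvSliceSucc (ws : List String) (s j : Nat) (hsj : s ≤ j) (hj : j < ws.length) :
    PySem.List.slice ws (some (s:Int)) (some (j:Int)) ++ [ws[j]]
      = PySem.List.slice ws (some (s:Int)) (some ((j+1:Nat):Int)) := by
  rw [PySem.List.slice_natCast, PySem.List.slice_natCast]
  have h1 : j + 1 - s = (j - s) + 1 := by omega
  rw [h1, List.take_add_one]
  have h2 : (ws.drop s)[j - s]? = some ws[j] := by
    rw [List.getElem?_drop]
    rw [List.getElem?_eq_getElem (by omega)]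
    congr 2
    omega
  rw [h2]
  rfl

lemma pvSliceOne (ws : List String) (j : Nat) (hj : j < ws.length) :
    PySem.List.slice ws (some (j:Int)) (some ((j+1:Nat):Int)) = [ws[j]] := by
  have h := pvSliceSucc ws j j (le_refl j) hj
  rw [← h]
  have h2 : PySem.List.slice ws (some (j:Int)) (some (j:Int)) = [] := by
    rw [PySem.List.slice_natCast]; simp
  rw [h2]
  rfl

lemma pvMain (ws : List String) (M : Int) (k : Nat) :
    ∀ s j : Nat, ws.length - j ≤ k → s < j → j ≤ ws.length →
    (pvS ws j - pvS ws s ≤ M ∨ j = s + 1) →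
    pvChunks M (PySem.List.slice ws (some (s:Int)) (some (j:Int))) (pvS ws j - pvS ws s) (ws.drop j)
      = PySem.Str.join " "
          (PySem.List.slice ws (some (s:Int)) (some (pvE ((List.range (ws.length+1)).map (pvS ws)) M (ws.length : Int) (s:Int))))
        :: pvSegLoop ws ((List.range (ws.length+1)).map (pvS ws)) M (ws.length : Int)
             (pvE ((List.range (ws.length+1)).map (pvS ws)) M (ws.length : Int) (s:Int)) := by
  induction k with
  | zero =>
      intro s j hk hsj hjn hdisj
      have hj : j = ws.length := by omega
      subst hj
      obtain ⟨e, hEeq, he1, he2, he3, he4, he5⟩ := pvE_char ws M s (by omega)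
      have hen : e = ws.length := by
        rcases hdisj with h | h
        · have := he5 ws.length (by omega) (le_refl _) h
          omega
        · omega
      rw [List.drop_length]
      unfold pvChunks
      rw [if_neg (by simpa using pvSliceNe ws s ws.length hsj (le_refl _))]
      rw [hEeq, hen]
      rw [pvSegLoop_stop _ _ _ _ _ (by omega)]
  | succ k ih =>
      intro s j hk hsj hjn hdisj
      obtain ⟨e, hEeq, he1, he2, he3, he4, he5⟩ := pvE_char ws M s (by omega)
      rcases Nat.eq_or_lt_of_le hjn with hj | hj
      · subst hj
        have hen : e = ws.length := by
          rcases hdisj with h | h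
          · have := he5 ws.length (by omega) (le_refl _) h
            omega
          · omega
        rw [List.drop_length]
        unfold pvChunks
        rw [if_neg (by simpa using pvSliceNe ws s ws.length hsj (le_refl _))]
        rw [hEeq, hen]
        rw [pvSegLoop_stop _ _ _ _ _ (by omega)]
      · have hdrop : ws.drop j = ws[j] :: ws.drop (j+1) := List.drop_eq_getElem_cons hj
        rw [hdrop]
        unfold pvChunks
        have hwt : pvS ws j - pvS ws s + pvWt ws[j] = pvS ws (j+1) - pvS ws s := by
          have := pvS_succ ws j hj
          omega
        rcases Int.lt_or_le M (pvS ws (j+1) - pvS ws s) with hcut | hnocut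
        · rw [if_pos ⟨pvSliceNe ws s j hsj (by omega), by omega⟩]
          have hej : e = j := by
            have hge : j ≤ e := by
              rcases hdisj with h | h
              · exact he5 j hsj (by omega) h
              · omega
            have hle : e ≤ j := by
              by_contra hcon
              rcases he3 with h | h
              · have hm := pvS_add_le ws (j+1) e (by omega) he2
                omega
              · omega
            omega
          have hrec := ih j (j+1) (by omega) (by omega) (by omega) (Or.inr rfl)
          rw [pvSliceOne ws j hj] at hrec
          have hws : pvWt ws[j] = pvS ws (j+1) - pvS ws j := by
            have := pvS_succ ws j hj
            omega
          rw [hEeq, hej]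
          rw [pvSegLoop_step ws ((List.range (ws.length+1)).map (pvS ws)) M (ws.length:Int) (j:Int) (by exact_mod_cast hj)]
          rw [hws, hrec]
        · rw [if_neg (by rintro ⟨-, hgt⟩; omega)]
          rw [hwt, pvSliceSucc ws s j (by omega) hj]
          exact ih s (j+1) (by omega) (by omega) (by omega) (Or.inl (by omega))

lemma pvPreEq (ws : List String) :
    [0] ++ (List.range ws.length).map (fun i => 0 + pvS ws (i+1))
      = (List.range (ws.length+1)).map (pvS ws) := by
  rw [List.range_succ_eq_map]
  simp [Function.comp, pvS]

lemma pvTop (ws : List String) (M : Int) (h : ws ≠ []) :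
    pvChunks M [] 0 ws
      = pvSegLoop ws ((List.range (ws.length+1)).map (pvS ws)) M (ws.length : Int) 0 := by
  have hn : 0 < ws.length := List.length_pos_of_ne_nil h
  have hcons : ws = ws[0] :: ws.drop 1 := by
    rw [← List.drop_eq_getElem_cons hn]
    simp
  conv_lhs => rw [hcons]
  unfold pvChunks
  rw [if_neg (by simp)]
  have h1 : (0 : Int) + pvWt ws[0] = pvS ws 1 - pvS ws 0 := by
    have := pvS_succ ws 0 hn
    simp [pvS] at this ⊢
    omega
  rw [h1]
  rw [List.nil_append, show ([ws[0]] : List String) = PySem.List.slice ws (some ((0:Nat):Int)) (some ((0+1:Nat):Int)) from (pvSliceOne ws 0 hn).symm]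
  have := pvMain ws M ws.length 0 1 (by omega) (by omega) (by omega) (Or.inr rfl)
  rw [show ((1:Nat):Int) = ((0+1:Nat):Int) by norm_num] at this
  rw [this]
  rw [pvSegLoop_step ws ((List.range (ws.length+1)).map (pvS ws)) M (ws.length : Int) 0 (by exact_mod_cast hn)]
  rfl

-- ===== VERDICT (by name: the statement is the Claim_ definition above) =====
theorem split_paragraph_py_spec : Claim_equal_split_paragraph_py := by
  intro paragraph M _dom
  unfold Spec_split_paragraph_py split_paragraph_py split_paragraph_py_alt
  by_cases h1 : pvEstTokens paragraph.toList ≤ M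
  · simp [h1]
  · rw [if_neg h1, if_neg h1]
    by_cases h2 : PySem.Str.split₀ paragraph = []
    · simp [h2]
    · rw [if_neg h2, if_neg h2]
      set ws := PySem.Str.split₀ paragraph with hws
      have hfoldA := pvFoldA M ws [] [] 0
      unfold pvFin at hfoldA
      rw [hfoldA]
      rw [pvFoldPre ws [0] 0]
      rw [pvPreEq ws]
      rw [List.nil_append]
      exact pvTop ws M h2
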